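-- pv_equiv track=rewrite | github.com/valossalabs/metadata-reader | metareader/mdreader.py | _person_match
-- ===== SOURCE A (Python) =====
-- def _person_match(detection, args):
--     """
--     `detection` is the single detection cell
--     `args` can be either `all` or comma separated string of persons.
--     eg. "Brad Pitt","George Clooney"
--     Windcards aren't supported and names are case-sensitive (at the moment).
--     Returns `True` if match is found.
--     """
--
--     if "a" not in detection:
--         return False
--     if "similar_to" not in detection["a"]:
--         return False
--     # if args == "all":
--     #    return True
--
--     nameList = [x["name"] for x in detection["a"]["similar_to"]]
--     argList = [x.strip() for x in args.split(',')]
--     if True in [_wildcard_search(keyarg, name) for keyarg in argList for name in nameList]: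
--         return True
--     return False
--
-- def _wildcard_search(keyword, det_cell):
--     """If keyword in list: True
--     """
--     wildcard = False
--     keylist = keyword.split("*")
--     for key in keylist:
--         index = det_cell.find(key)
--         if index == -1:  # -1 means no matches
--             return False
--         if index > 0 and wildcard is False:
--             return False
--         det_cell = det_cell[index+len(key):]
--         wildcard = True
--     # If last character was not wildcard and there are characters left in det_cell
--     # then there isn't match:
--     if key != "" and det_cell != "":
--         return False
--     return True
-- ===== SOURCE B (Python) =====
-- def _person_match(detection, args):
--     """
--     Same result as the original: True iff some comma-separated pattern in
--     `args` matches (with the original's anchored, leftmost-consume '*'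
--     semantics) some similar_to name in `detection`.
--     """
--     if "a" not in detection or "similar_to" not in detection["a"]:
--         return False
--     names = [x["name"] for x in detection["a"]["similar_to"]]
--     return any(
--         _glob_match(pat.strip(), name)
--         for pat in args.split(",")
--         for name in names
--     )
--
--
-- def _consume(segs, rest):
--     """Consume each segment at its first occurrence; None if one is absent."""
--     if not segs:
--         return rest
--     i = rest.find(segs[0])
--     if i == -1:
--         return None
--     return _consume(segs[1:], rest[i + len(segs[0]):])
--
--
-- def _glob_match(pattern, name):
--     segs = pattern.split("*")
--     if not name.startswith(segs[0]):
--         return False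
--     rest = _consume(segs[1:], name[len(segs[0]):])
--     return rest is not None and (segs[-1] == "" or rest == "")
-- ===== Notes on version B (the rewrite author's own statement) =====
-- stated objective: simpler
-- what changed: A's wildcard matcher scans every segment with find plus a mutable wildcard flag and a leftover loop variable for the final check, and builds the full cross-product list of booleans before testing True in it; B anchors the first segment with startswith, consumes the remaining segments with a small Option-returning recursive consumer, and short-circuits with any() over comma patterns and names.
import Mathlib
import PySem

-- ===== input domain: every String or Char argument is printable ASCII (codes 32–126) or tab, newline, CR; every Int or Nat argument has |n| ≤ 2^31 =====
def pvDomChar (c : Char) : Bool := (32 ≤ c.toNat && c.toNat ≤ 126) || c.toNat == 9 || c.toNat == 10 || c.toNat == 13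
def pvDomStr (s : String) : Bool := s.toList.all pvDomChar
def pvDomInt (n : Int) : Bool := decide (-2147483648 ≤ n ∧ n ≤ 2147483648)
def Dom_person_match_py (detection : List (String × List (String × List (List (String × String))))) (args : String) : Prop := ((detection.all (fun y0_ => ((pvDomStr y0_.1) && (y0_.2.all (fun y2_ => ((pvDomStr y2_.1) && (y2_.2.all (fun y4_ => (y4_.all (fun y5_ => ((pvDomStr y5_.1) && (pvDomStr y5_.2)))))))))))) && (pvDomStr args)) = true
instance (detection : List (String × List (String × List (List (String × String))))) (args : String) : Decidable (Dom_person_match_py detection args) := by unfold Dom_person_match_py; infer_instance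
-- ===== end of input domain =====

-- B replaces A's wildcard-flag scanning loop by a prefix anchor plus an Option-returning
-- segment consumer and short-circuiting any() over patterns (objective: simpler).

-- s.split(sep) for a non-empty literal sep: split? is some there, exact.
def pvSplit (s sep : String) : List String := (PySem.Str.split? s sep).getD [s]

-- ===== PORT A =====
-- the for-loop of _wildcard_search; state (det_cell, wildcard, key); none = early `return False`,
-- some (key, det_cell) = loop finished with these leftover variables
def pvWcLoop (keys : List String) (det_cell : String) (wildcard : Bool) (key : String) :
    Option (String × String) :=
  match keys with
  | [] => some (key, det_cell)
  | k :: rest =>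
    let index := PySem.Str.find det_cell k
    if index = -1 then none
    else if index > 0 ∧ wildcard = false then none
    else pvWcLoop rest (PySem.Str.slice det_cell (some (index + PySem.Str.len k)) none) true k

def pvWildcardSearch (keyword det_cell : String) : Bool :=
  match pvWcLoop (pvSplit keyword "*") det_cell false "" with
  | none => false
  | some (key, det') => if key ≠ "" ∧ det' ≠ "" then false else true

def person_match_py (detection : List (String × List (String × List (List (String × String))))) (args : String) : Bool :=
  let d := PySem.Dict.mk detection
  if ¬ (d.contains "a") then false
  else
    let da := PySem.Dict.mk (d.getD "a" [])
    if ¬ (da.contains "similar_to") then false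
    else
      -- x["name"] raises KeyError when absent: Pre_ requires the key, getD's default is never used there
      let nameList := (da.getD "similar_to" []).map (fun x => (PySem.Dict.mk x).getD "name" "")
      let argList := (pvSplit args ",").map (fun x => PySem.Str.strip x)
      if (argList.flatMap (fun keyarg => nameList.map (fun name => pvWildcardSearch keyarg name))).contains true
      then true else false

-- ===== PORT B =====
-- _consume: each segment eaten at its first occurrence; none when one is absent
def pvConsume (segs : List String) (rest : String) : Option String :=
  match segs with
  | [] => some rest
  | seg :: more =>
    let i := PySem.Str.find rest seg
    if i = -1 then none
    else pvConsume more (PySem.Str.slice rest (some (i + PySem.Str.len seg)) none)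

def pvGlobMatch (pattern name : String) : Bool :=
  let segs := pvSplit pattern "*"
  if PySem.Str.startswith name (PySem.List.pyGetD segs 0 "") then
    match pvConsume segs.tail
        (PySem.Str.slice name (some (PySem.Str.len (PySem.List.pyGetD segs 0 ""))) none) with
    | none => false
    | some rest => PySem.List.pyGetD segs (-1) "" == "" || rest == ""
  else false

def person_match_py_alt (detection : List (String × List (String × List (List (String × String))))) (args : String) : Bool :=
  let d := PySem.Dict.mk detection
  if d.contains "a" && (PySem.Dict.mk (d.getD "a" [])).contains "similar_to" then
    let names := ((PySem.Dict.mk (d.getD "a" [])).getD "similar_to" []).map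
      (fun x => (PySem.Dict.mk x).getD "name" "")
    (pvSplit args ",").any (fun pat => names.any (fun name => pvGlobMatch (PySem.Str.strip pat) name))
  else false

-- ===== PRECONDITION & SPEC =====
-- Pre_ excludes only inputs on which Python A RAISES (KeyError: a similar_to entry without a
-- "name" key); when "a" or "similar_to" is absent the getD defaults make the condition vacuous.
def Pre_person_match_py (detection : List (String × List (String × List (List (String × String))))) (args : String) : Prop :=
  ∀ x ∈ (PySem.Dict.mk ((PySem.Dict.mk detection).getD "a" [])).getD "similar_to" [],
    (PySem.Dict.mk x).contains "name" = true
instance (detection : List (String × List (String × List (List (String × String))))) (args : String) : Decidable (Pre_person_match_py detection args) := by unfold Pre_person_match_py; infer_instance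

def pvWitness_person_match_py : (List (String × List (String × List (List (String × String))))) × String :=
  ([("a", [("similar_to", [[("name", "Ann")], [("name", "Bob")]])])], "An*, *ob")

def Spec_person_match_py (detection : List (String × List (String × List (List (String × String))))) (args : String) (out : Bool) : Prop := out = person_match_py_alt detection args
instance (detection : List (String × List (String × List (List (String × String))))) (args : String) (out : Bool) : Decidable (Spec_person_match_py detection args out) := by unfold Spec_person_match_py; infer_instance

-- ===== CLAIM (what is proved, stated in full; the proofs are below) =====
def Claim_equal_person_match_py : Prop := ∀ (detection : List (String × List (String × List (List (String × String))))) (args : String), Dom_person_match_py detection args → Pre_person_match_py detection args → Spec_person_match_py detection args (person_match_py detection args)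

-- ===== LEMMAS AND PROOFS =====

-- once the wildcard flag is set, A's loop is exactly B's consumer (the leftover `key`
-- variable is the last segment)
theorem pvWcLoop_eq_consume (segs : List String) (det key : String) :
    pvWcLoop segs det true key = (pvConsume segs det).map (fun r => (segs.getLastD key, r)) := by
  induction segs generalizing det key with
  | nil => simp [pvWcLoop, pvConsume]
  | cons k rest ih =>
    simp only [pvWcLoop, pvConsume, List.getLastD_cons]
    by_cases h : PySem.Chars.find det.toList k.toList = -1
    · simp [h]
    · simp [h, ih]

theorem pv_sw_zero (det k : List Char) (h : PySem.Chars.find det k = 0) :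
    PySem.Chars.startswith det k = true := by
  have hpre := (PySem.Chars.find_spec (s := det) (sub := k) (by rw [h])).1
  rw [h] at hpre
  simp at hpre
  exact (PySem.Chars.startswith_iff _ _).mpr hpre

theorem pv_sw_neg (det k : List Char) (h : PySem.Chars.find det k = -1) :
    PySem.Chars.startswith det k = false := by
  rw [Bool.eq_false_iff]
  intro htrue
  exact (PySem.Chars.find_eq_neg_one_iff _ _).mp h
    ((PySem.Chars.startswith_iff _ _).mp htrue).isInfix

theorem pv_sw_pos (det k : List Char) (h : 0 < PySem.Chars.find det k) :
    PySem.Chars.startswith det k = false := by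
  have hspec := (PySem.Chars.find_spec (s := det) (sub := k) (le_of_lt h)).2 0 (by omega)
  simp at hspec
  rw [Bool.eq_false_iff]
  intro htrue
  exact hspec ((PySem.Chars.startswith_iff _ _).mp htrue)

-- A's leftover-variable finish equals B's single disjunction
theorem pv_endcheck (a r : String) :
    (if a ≠ "" ∧ r ≠ "" then false else true) = (a == "" || r == "") := by
  by_cases ha : a = "" <;> by_cases hr : r = "" <;> simp [ha, hr]

theorem pv_tail_eq (rest : List String) (k s : String) :
    (match (pvConsume rest s).map (fun r => (rest.getLastD k, r)) with
     | none => false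
     | some (key, det') => if key ≠ "" ∧ det' ≠ "" then false else true)
    = (match pvConsume rest s with
       | none => false
       | some r => PySem.List.pyGetD (k :: rest) (-1) "" == "" || r == "") := by
  cases pvConsume rest s with
  | none => rfl
  | some r =>
      simp only [Option.map_some]
      rw [PySem.List.pyGetD_neg_one _ _ (List.cons_ne_nil k rest), List.getLast_eq_getLastD]
      exact pv_endcheck _ _

-- A's matcher agrees with B's matcher on every (pattern, name) pair
theorem pvWildcardSearch_eq_globMatch (kw det : String) :
    pvWildcardSearch kw det = pvGlobMatch kw det := by
  unfold pvWildcardSearch pvGlobMatch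
  cases hsp : pvSplit kw "*" with
  | nil =>
      have hsw : PySem.Chars.startswith det.toList [] = true :=
        (PySem.Chars.startswith_iff _ _).mpr (List.nil_prefix)
      simp [pvWcLoop, pvConsume, PySem.List.pyGetD, PySem.List.pyGet?_zero,
        PySem.List.pyGet?_neg_one, hsw]
  | cons k rest =>
      by_cases hm1 : PySem.Chars.find det.toList k.toList = -1
      · simp [pvWcLoop, hm1, pv_sw_neg det.toList k.toList hm1]
      · by_cases h0 : PySem.Chars.find det.toList k.toList = 0
        · simp only [pvWcLoop, PySem.Str.find_eq, PySem.Str.startswith_eq, h0, zero_add,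
            List.tail_cons, PySem.List.pyGetD_zero_cons, pv_sw_zero det.toList k.toList h0,
            if_true]
          rw [if_neg (by norm_num : ¬((0 : Int) = -1)),
            if_neg (by simp : ¬((0 : Int) > 0 ∧ True)),
            pvWcLoop_eq_consume]
          exact pv_tail_eq rest k _
        · have hpos : 0 < PySem.Chars.find det.toList k.toList := by
            have := PySem.Chars.neg_one_le_find det.toList k.toList
            omega
          simp [pvWcLoop, hm1, pv_sw_pos det.toList k.toList hpos,
            (by omega : 0 < PySem.Chars.find det.toList k.toList)]

-- ===== VERDICT (by name: the statement is the Claim_ definition above) =====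
theorem person_match_py_spec : Claim_equal_person_match_py := by
  intro detection args _hdom _hpre
  unfold Spec_person_match_py
  unfold person_match_py person_match_py_alt
  by_cases h1 : (PySem.Dict.mk detection).contains "a" = true
  · by_cases h2 : (PySem.Dict.mk ((PySem.Dict.mk detection).getD "a" [])).contains "similar_to" = true
    · simp only [h1, h2, not_true, if_false, Bool.and_self, if_true]
      rw [Bool.eq_iff_iff]
      simp [pvWildcardSearch_eq_globMatch, List.any_eq_true, Function.comp]
    · simp [h1, h2]
  · simp [h1]
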